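-- pv_equiv track=rewrite | github.com/Wandering-Star71/Data-light-Inverse-Reinforcement-Learning | collect_highd.py | generate_sequences
-- ===== SOURCE A (Python) =====
-- def generate_sequences(length):
--     sequences = []
--     start = 0
--     while start + 15 <= length:
--         end = min(start + 5 * 3, length)
--         sequences.append([i for i in range(start, end + 1) if i % 5 == 0])
--         start += 30
--     return sequences
-- ===== SOURCE B (Python) =====
-- def generate_sequences(length):
--     # Each window's chunk is exactly the four multiples of 5 starting at `start`;
--     # build it arithmetically instead of scanning-and-filtering a 16-element range.
--     return [[s, s + 5, s + 10, s + 15] for s in range(0, length - 14, 30)]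
-- ===== Notes on version B (the rewrite author's own statement) =====
-- stated objective: simpler
-- what changed: Replaces the while-loop that scans each 16-element range and filters by i%5==0 (with a dead min-clamp) by a single comprehension over range(0, length-14, 30) that writes each chunk [s, s+5, s+10, s+15] in closed form.
import Mathlib
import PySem

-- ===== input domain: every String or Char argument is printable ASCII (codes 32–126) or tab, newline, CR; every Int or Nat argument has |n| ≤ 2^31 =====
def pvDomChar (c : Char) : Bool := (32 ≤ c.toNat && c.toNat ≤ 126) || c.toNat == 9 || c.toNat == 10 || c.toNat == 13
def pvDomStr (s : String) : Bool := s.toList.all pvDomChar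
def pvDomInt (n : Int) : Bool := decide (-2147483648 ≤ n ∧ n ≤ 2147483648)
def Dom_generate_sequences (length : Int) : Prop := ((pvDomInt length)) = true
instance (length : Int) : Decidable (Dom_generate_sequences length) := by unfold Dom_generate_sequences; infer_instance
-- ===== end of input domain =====

-- B replaces A's scan-and-filter of each 16-element window (and its dead min-clamp) by a
-- closed-form comprehension over range(0, length-14, 30); objective: simpler.

-- ===== PORT A =====
-- the while loop, as structural recursion on the distance still to cover
def gsLoopA (length start : Int) (sequences : List (List Int)) : List (List Int) :=
  if _h : start + 15 ≤ length then
    let e := min (start + 5 * 3) length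
    gsLoopA length (start + 30)
      (sequences ++ [(PySem.List.pyRange start (e + 1) 1).filter (fun i => PySem.Int.mod i 5 == 0)])
  else sequences
termination_by (length + 15 - start).toNat
decreasing_by omega

def generate_sequences (length : Int) : List (List Int) := gsLoopA length 0 []

-- ===== PORT B =====
def generate_sequences_alt (length : Int) : List (List Int) :=
  (PySem.List.pyRange 0 (length - 14) 30).map (fun s => [s, s + 5, s + 10, s + 15])

-- ===== PRECONDITION & SPEC =====
def Spec_generate_sequences (length : Int) (out : List (List Int)) : Prop := out = generate_sequences_alt length
instance (length : Int) (out : List (List Int)) : Decidable (Spec_generate_sequences length out) := by unfold Spec_generate_sequences; infer_instance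

-- ===== CLAIM (what is proved, stated in full; the proofs are below) =====
def Claim_equal_generate_sequences : Prop := ∀ (length : Int), Dom_generate_sequences length → Spec_generate_sequences length (generate_sequences length)

-- ===== LEMMAS AND PROOFS =====

-- the filtered 16-element window is exactly the four multiples of 5 from its start
theorem gsChunk_eq (s : Int) (hs : s % 5 = 0) :
    (PySem.List.pyRange s (s + 15 + 1) 1).filter (fun i => PySem.Int.mod i 5 == 0)
      = [s, s + 5, s + 10, s + 15] := by
  have h : s + 15 + 1 - s = 16 := by ring
  rw [PySem.List.pyRange_one, h]
  have hm : ∀ a : Int, PySem.Int.mod a 5 = a % 5 := by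
    intro a; simp [PySem.Int.mod, Int.fmod_eq_emod]
  rw [show (16 : Int).toNat = 16 from rfl]
  simp only [List.range_succ, List.range_zero, List.map_append, List.map_cons, List.map_nil,
    List.filter_append, List.filter_cons, List.filter_nil, hm]
  norm_num
  have d0 : (5 : Int) ∣ s := by omega
  have d1 : ¬ (5 : Int) ∣ s + 1 := by omega
  have d2 : ¬ (5 : Int) ∣ s + 2 := by omega
  have d3 : ¬ (5 : Int) ∣ s + 3 := by omega
  have d4 : ¬ (5 : Int) ∣ s + 4 := by omega
  have d6 : ¬ (5 : Int) ∣ s + 6 := by omega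
  have d7 : ¬ (5 : Int) ∣ s + 7 := by omega
  have d8 : ¬ (5 : Int) ∣ s + 8 := by omega
  have d9 : ¬ (5 : Int) ∣ s + 9 := by omega
  have d10 : (5 : Int) ∣ s + 10 := by omega
  have d11 : ¬ (5 : Int) ∣ s + 11 := by omega
  have d12 : ¬ (5 : Int) ∣ s + 12 := by omega
  have d13 : ¬ (5 : Int) ∣ s + 13 := by omega
  have d14 : ¬ (5 : Int) ∣ s + 14 := by omega
  have d15 : (5 : Int) ∣ s + 15 := by omega
  simp [d0, d1, d2, d3, d4, d6, d7, d8, d9, d10, d11, d12, d13, d14, d15]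

-- the loop, run for exactly N iterations from a start divisible by 5
theorem gsLoopA_eq (N : Nat) : ∀ (length start : Int) (acc : List (List Int)),
    start % 5 = 0 →
    length - 14 ≤ start + 30 * N →
    (0 < (N : Int) → start + 30 * N - 30 < length - 14) →
    gsLoopA length start acc
      = acc ++ (List.range N).map
          (fun k : Nat => [start + 30 * (k : Int), start + 30 * (k : Int) + 5,
            start + 30 * (k : Int) + 10, start + 30 * (k : Int) + 15]) := by
  induction N with
  | zero =>
    intro length start acc _ h1 _
    rw [gsLoopA]
    simp only [Nat.cast_zero, mul_zero, add_zero] at h1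
    simp [show ¬ (start + 15 ≤ length) by omega]
  | succ n ih =>
    intro length start acc hs h1 h2
    have hcond : start + 15 ≤ length := by
      have := h2 (by positivity)
      push_cast at this h1 ⊢
      omega
    rw [gsLoopA]
    rw [dif_pos hcond]
    simp only
    have hmin : min (start + 5 * 3) length = start + 15 := by omega
    rw [hmin, gsChunk_eq start hs,
      ih length (start + 30) _ (by omega) (by push_cast at h1 ⊢; omega)
        (by intro h; push_cast at h2 ⊢; omega)]
    rw [List.range_succ_eq_map]
    simp only [List.map_cons, List.map_map, Nat.cast_zero, mul_zero, add_zero,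
      List.append_assoc, List.singleton_append]
    congr 1
    congr 1
    apply List.map_congr_left
    intro k _
    simp only [Function.comp_apply, Nat.succ_eq_add_one]
    push_cast
    simp only [List.cons.injEq, and_true]
    refine ⟨by ring, by ring, by ring, by ring⟩

-- ===== VERDICT (by name: the statement is the Claim_ definition above) =====
theorem generate_sequences_spec : Claim_equal_generate_sequences := by
  intro length _
  unfold Spec_generate_sequences generate_sequences generate_sequences_alt
  rw [PySem.List.pyRange_of_pos 0 (length - 14) (by norm_num)]
  by_cases hp : (0 : Int) < length - 14
  · set N : Nat := ((length - 14 + 29) / 30).toNat with hN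
    rw [gsLoopA_eq N length 0 [] (by norm_num) (by omega) (by intro _; omega)]
    rw [if_pos hp, show ((length - 14 - 0 + 30 - 1) / 30).toNat = N by omega]
    rw [List.map_map, List.nil_append]
    apply List.map_congr_left
    intro k _
    simp only [Function.comp_apply]
  · rw [gsLoopA_eq 0 length 0 [] (by norm_num) (by push_cast; omega) (by intro h; exact absurd h (by norm_num))]
    rw [if_neg hp]
    simp
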